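-- pv_equiv track=rewrite | github.com/CupofJavad/Anti-Language-Encryption-Tool- | LipsumLab/tools/lexicon_fit.py | tokenize_letters_only
-- ===== SOURCE A (Python) =====
-- import argparse, os, math, unicodedata, glob, io
--
-- def is_letter(ch: str) -> bool:
--     return unicodedata.category(ch).startswith("L")
--
-- def tokenize_letters_only(txt: str, minlen=2, maxlen=10**9):
--     out, cur = [], []
--     for ch in txt:
--         if is_letter(ch):
--             cur.append(ch.lower())
--         else:
--             if cur:
--                 w = "".join(cur)
--                 if minlen <= len(w) <= maxlen:
--                     out.append(w)
--                 cur = []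
--     if cur:
--         w = "".join(cur).lower()
--         if minlen <= len(w) <= maxlen:
--             out.append(w)
--     return out
-- ===== SOURCE B (Python) =====
-- import unicodedata
--
-- def is_letter(ch: str) -> bool:
--     return unicodedata.category(ch).startswith("L")
--
-- def tokenize_letters_only(txt: str, minlen=2, maxlen=10**9):
--     # transform-then-split: letters lowered, everything else becomes a space
--     cleaned = "".join(ch.lower() if is_letter(ch) else " " for ch in txt)
--     return [w for w in cleaned.split() if minlen <= len(w) <= maxlen]
-- ===== Notes on version B (the rewrite author's own statement) =====
-- stated objective: simpler
-- what changed: Replaced the explicit accumulator-and-flush loop with a transform-then-split pipeline: map each char to its lowercase letter or a space, call str.split() to get words, then filter by length.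
import Mathlib
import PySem

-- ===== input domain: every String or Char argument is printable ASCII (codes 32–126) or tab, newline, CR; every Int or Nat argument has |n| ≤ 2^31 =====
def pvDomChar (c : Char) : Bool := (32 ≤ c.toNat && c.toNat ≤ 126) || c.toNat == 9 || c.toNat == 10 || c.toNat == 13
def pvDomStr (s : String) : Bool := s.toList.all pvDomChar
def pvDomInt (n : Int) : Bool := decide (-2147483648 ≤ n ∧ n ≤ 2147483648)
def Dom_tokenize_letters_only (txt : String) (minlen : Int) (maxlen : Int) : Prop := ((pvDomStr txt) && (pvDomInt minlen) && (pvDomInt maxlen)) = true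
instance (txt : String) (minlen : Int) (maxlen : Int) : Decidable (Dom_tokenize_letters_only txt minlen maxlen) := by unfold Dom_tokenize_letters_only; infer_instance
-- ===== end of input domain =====

-- B replaces A's accumulator-and-flush loop by a transform-then-split pipeline (objective: simpler).

-- ===== PORT A =====
-- is_letter(ch) = unicodedata.category(ch).startswith("L"); on the ASCII domain this is exactly
-- PySem.Chars.isalpha, and ch.lower() is exactly PySem.Chars.lowerChar.
def tokenize_letters_only (txt : String) (minlen : Int) (maxlen : Int) : List String :=
  let st := txt.toList.foldl (fun (st : List String × List Char) ch =>
    if PySem.Chars.isalpha ch then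
      (st.1, st.2 ++ [PySem.Chars.lowerChar ch])
    else if st.2 ≠ [] then
      let w := String.ofList st.2
      if minlen ≤ PySem.Str.len w ∧ PySem.Str.len w ≤ maxlen then (st.1 ++ [w], ([] : List Char))
      else (st.1, ([] : List Char))
    else st) ([], [])
  if st.2 ≠ [] then
    let w := PySem.Str.lower (String.ofList st.2)
    if minlen ≤ PySem.Str.len w ∧ PySem.Str.len w ≤ maxlen then st.1 ++ [w] else st.1
  else st.1

-- ===== PORT B =====
def tokenize_letters_only_alt (txt : String) (minlen : Int) (maxlen : Int) : List String :=
  let cleaned := String.ofList (txt.toList.map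
    (fun ch => if PySem.Chars.isalpha ch then PySem.Chars.lowerChar ch else ' '))
  (PySem.Str.split₀ cleaned).filter
    (fun w => decide (minlen ≤ PySem.Str.len w ∧ PySem.Str.len w ≤ maxlen))

-- ===== PRECONDITION & SPEC =====
def Spec_tokenize_letters_only (txt : String) (minlen : Int) (maxlen : Int) (out : List String) : Prop := out = tokenize_letters_only_alt txt minlen maxlen
instance (txt : String) (minlen : Int) (maxlen : Int) (out : List String) : Decidable (Spec_tokenize_letters_only txt minlen maxlen out) := by unfold Spec_tokenize_letters_only; infer_instance

-- ===== CLAIM (what is proved, stated in full; the proofs are below) =====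
def Claim_equal_tokenize_letters_only : Prop := ∀ (txt : String) (minlen : Int) (maxlen : Int), Dom_tokenize_letters_only txt minlen maxlen → Spec_tokenize_letters_only txt minlen maxlen (tokenize_letters_only txt minlen maxlen)

-- ===== LEMMAS AND PROOFS =====

-- the words of the text: cur is the current (reversed) run of lowered letters
def pvWords : List Char → List Char → List (List Char)
  | [], cur => if cur.isEmpty then [] else [cur.reverse]
  | c :: cs, cur =>
    if PySem.Chars.isalpha c then pvWords cs (PySem.Chars.lowerChar c :: cur)
    else if cur.isEmpty then pvWords cs [] else cur.reverse :: pvWords cs []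

theorem pv_char_toNat_ofNat {n : Nat} (h : n < 0xd800) : (Char.ofNat n).toNat = n := by
  unfold Char.ofNat
  rw [dif_pos (by exact Or.inl h : Nat.isValidChar n)]
  rfl

theorem pv_isupper_iff (c : Char) :
    PySem.Chars.isupper c = true ↔ (65 ≤ c.toNat ∧ c.toNat ≤ 90) := by
  simp [PySem.Chars.isupper, Char.le_def, UInt32.le_iff_toNat_le]

theorem pv_isalpha_toNat {c : Char} (h : PySem.Chars.isalpha c = true) :
    (65 ≤ c.toNat ∧ c.toNat ≤ 90) ∨ (97 ≤ c.toNat ∧ c.toNat ≤ 122) := by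
  simpa [PySem.Chars.isalpha, PySem.Chars.isupper, PySem.Chars.islower, Char.le_def,
    UInt32.le_iff_toNat_le] using h

theorem pv_lower_toNat {c : Char} (h : PySem.Chars.isalpha c = true) :
    97 ≤ (PySem.Chars.lowerChar c).toNat ∧ (PySem.Chars.lowerChar c).toNat ≤ 122 := by
  by_cases hu : PySem.Chars.isupper c = true
  · obtain ⟨h1, h2⟩ := (pv_isupper_iff c).mp hu
    rw [PySem.Chars.lowerChar, if_pos hu, pv_char_toNat_ofNat (by omega)]
    omega
  · rw [PySem.Chars.lowerChar, if_neg hu]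
    rcases pv_isalpha_toNat h with hb | hb
    · exact absurd ((pv_isupper_iff c).mpr hb) hu
    · omega

theorem pv_isspace_lower {c : Char} (h : PySem.Chars.isalpha c = true) :
    PySem.Chars.isspace (PySem.Chars.lowerChar c) = false := by
  obtain ⟨h1, h2⟩ := pv_lower_toNat h
  simp [PySem.Chars.isspace]
  omega

theorem pv_lower_idem {c : Char} (h : PySem.Chars.isalpha c = true) :
    PySem.Chars.lowerChar (PySem.Chars.lowerChar c) = PySem.Chars.lowerChar c := by
  obtain ⟨h1, h2⟩ := pv_lower_toNat h
  have hnot : ¬ PySem.Chars.isupper (PySem.Chars.lowerChar c) = true := by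
    intro hz
    obtain ⟨_, h90⟩ := (pv_isupper_iff _).mp hz
    omega
  conv_lhs => rw [PySem.Chars.lowerChar]
  rw [if_neg hnot]

-- split₀.go on the cleaned text computes acc.reverse ++ the words
theorem pv_go_eq (cs : List Char) : ∀ (cur : List Char) (acc : List (List Char)),
    PySem.Chars.split₀.go (cs.map (fun ch => if PySem.Chars.isalpha ch then PySem.Chars.lowerChar ch else ' ')) cur acc
      = acc.reverse ++ pvWords cs cur := by
  induction cs with
  | nil =>
    intro cur acc
    simp only [List.map_nil, PySem.Chars.split₀.go, pvWords]
    by_cases h : cur.isEmpty <;> simp [h]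
  | cons c cs ih =>
    intro cur acc
    by_cases h : PySem.Chars.isalpha c = true
    · simp only [List.map_cons, if_pos h, PySem.Chars.split₀.go,
        pv_isspace_lower h, Bool.false_eq_true, if_false, pvWords, if_pos h]
      exact ih _ _
    · have hsp : PySem.Chars.isspace ' ' = true := by decide
      simp only [List.map_cons, if_neg h, PySem.Chars.split₀.go, hsp, if_true,
        pvWords, if_neg h]
      by_cases hc : cur.isEmpty
      · simp only [hc, if_true]; exact ih _ _
      · simp only [hc, Bool.false_eq_true, if_false]
        rw [ih _ _]
        simp
-- A's loop with final flush equals the filtered words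
theorem pv_A_loop (minlen maxlen : Int) (cs : List Char) :
    ∀ (out : List String) (cur : List Char), cur.map PySem.Chars.lowerChar = cur →
    (let st := cs.foldl (fun (st : List String × List Char) ch =>
        if PySem.Chars.isalpha ch then
          (st.1, st.2 ++ [PySem.Chars.lowerChar ch])
        else if st.2 ≠ [] then
          let w := String.ofList st.2
          if minlen ≤ PySem.Str.len w ∧ PySem.Str.len w ≤ maxlen then (st.1 ++ [w], ([] : List Char))
          else (st.1, ([] : List Char))
        else st) (out, cur)
     if st.2 ≠ [] then
       let w := PySem.Str.lower (String.ofList st.2)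
       if minlen ≤ PySem.Str.len w ∧ PySem.Str.len w ≤ maxlen then st.1 ++ [w] else st.1
     else st.1)
    = out ++ ((pvWords cs cur.reverse).map String.ofList).filter
        (fun w => decide (minlen ≤ PySem.Str.len w ∧ PySem.Str.len w ≤ maxlen)) := by
  induction cs with
  | nil =>
    intro out cur hcur
    simp only [List.foldl_nil, pvWords, List.reverse_reverse]
    by_cases h : cur = []
    · simp [h]
    · have h' : cur.reverse.isEmpty = false := by simp [h]
      have hlow : PySem.Str.lower (String.ofList cur) = String.ofList cur := by
        simp [PySem.Str.lower, PySem.Chars.lower, hcur]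
      simp only [h', Bool.false_eq_true, if_false, if_pos (by simp [h] : cur ≠ [])]
      rw [hlow]
      by_cases hp : minlen ≤ PySem.Str.len (String.ofList cur) ∧ PySem.Str.len (String.ofList cur) ≤ maxlen
      all_goals first
        | (simp only [if_pos hp]
           have hp' : minlen ≤ (cur.length : Int) ∧ (cur.length : Int) ≤ maxlen := by
             simpa [PySem.Str.len] using hp
           simp [hp'])
        | (simp only [if_neg hp]
           have hp' : ¬ (minlen ≤ (cur.length : Int) ∧ (cur.length : Int) ≤ maxlen) := by
             simpa [PySem.Str.len] using hp
           simp [hp'])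
  | cons c cs ih =>
    intro out cur hcur
    by_cases h : PySem.Chars.isalpha c = true
    · simp only [List.foldl_cons, if_pos h, pvWords]
      have : (cur ++ [PySem.Chars.lowerChar c]).map PySem.Chars.lowerChar
          = cur ++ [PySem.Chars.lowerChar c] := by
        simp [hcur, pv_lower_idem h]
      have := ih out (cur ++ [PySem.Chars.lowerChar c]) this
      simpa using this
    · by_cases hc : cur = []
      · subst hc
        simp only [List.foldl_cons, if_neg h, ne_eq, not_true_eq_false, if_false,
          Bool.false_eq_true, pvWords, List.reverse_nil, List.isEmpty_nil, if_true, if_neg h]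
        exact ih out [] rfl
      · have h' : cur.reverse.isEmpty = false := by simp [hc]
        simp only [List.foldl_cons, if_neg h, if_pos hc, pvWords, if_neg h, h',
          Bool.false_eq_true, if_false, List.reverse_reverse]
        by_cases hp : minlen ≤ PySem.Str.len (String.ofList cur) ∧ PySem.Str.len (String.ofList cur) ≤ maxlen
        · have hp' : minlen ≤ (cur.length : Int) ∧ (cur.length : Int) ≤ maxlen := by
            simpa [PySem.Str.len] using hp
          simp only [if_pos hp, ne_eq]
          rw [ih (out ++ [String.ofList cur]) [] rfl]
          simp [hp']
        · have hp' : ¬ (minlen ≤ (cur.length : Int) ∧ (cur.length : Int) ≤ maxlen) := by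
            simpa [PySem.Str.len] using hp
          simp only [if_neg hp, ne_eq]
          rw [ih out [] rfl]
          simp [hp']

-- ===== VERDICT (by name: the statement is the Claim_ definition above) =====
theorem tokenize_letters_only_spec : Claim_equal_tokenize_letters_only := by
  intro txt minlen maxlen _
  unfold Spec_tokenize_letters_only tokenize_letters_only tokenize_letters_only_alt
  rw [pv_A_loop minlen maxlen txt.toList [] [] rfl]
  simp only [PySem.Str.split₀, PySem.Chars.split₀, String.toList_ofList]
  rw [pv_go_eq]
  simp [List.filter_map]
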